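-- pv_equiv track=rewrite | github.com/xinkeguoxue/AdventOfCode | calibration2.py | isBackSubstringOf
-- ===== SOURCE A (Python) =====
-- num = ['0', '1', '2', '3', '4', '5', '6', '7', '8', '9']
--
-- numbersBack = ['orez', 'eno', 'owt', 'eerht', 'ruof', 'evif', 'xis', 'neves', 'thgie', 'enin']
--
-- Dict2 = {'orez': 0,
--          'eno': 1,
--          'owt': 2,
--          'eerht': 3,
--          'ruof': 4,
--          'evif': 5,
--          'xis': 6,
--          'neves': 7,
--          'thgie': 8,
--          'enin': 9,
--          '0': 0,
--          '1': 1,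
--          '2': 2,
--          '3': 3,
--          '4': 4,
--          '5': 5,
--          '6': 6,
--          '7': 7,
--          '8': 8,
--          '9': 9}
--
-- def isBackSubstringOf(string):
--     indices={}
--     for i in numbersBack:
--         if string.find(i) > -1:
--             indices.update({i: string.find(i)})
--     for i in num:
--         if string.find(i) > -1:
--             indices.update({i: string.find(i)})
--     a = min(indices, key=indices.get)
--     return Dict2[a]
-- ===== SOURCE B (Python) =====
-- _TOKENS = [('orez', 0), ('eno', 1), ('owt', 2), ('eerht', 3), ('ruof', 4),
--            ('evif', 5), ('xis', 6), ('neves', 7), ('thgie', 8), ('enin', 9),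
--            ('0', 0), ('1', 1), ('2', 2), ('3', 3), ('4', 4),
--            ('5', 5), ('6', 6), ('7', 7), ('8', 8), ('9', 9)]
--
-- def isBackSubstringOf(string):
--     for i in range(len(string)):
--         for tok, val in _TOKENS:
--             if string.startswith(tok, i):
--                 return val
--     raise ValueError("no digit or reversed number word found")
-- ===== Notes on version B (the rewrite author's own statement) =====
-- stated objective: alternative
-- what changed: A runs string.find over the whole string for each of the 20 tokens, builds a dict of first-occurrence indices and takes the dict argmin; B makes one left-to-right scan of the string and returns at the first position where any token matches (no dict, no argmin).
-- outside the precondition, e.g. on isBackSubstringOf('abc'): A raises ValueError, B raises ValueError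
import Mathlib
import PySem

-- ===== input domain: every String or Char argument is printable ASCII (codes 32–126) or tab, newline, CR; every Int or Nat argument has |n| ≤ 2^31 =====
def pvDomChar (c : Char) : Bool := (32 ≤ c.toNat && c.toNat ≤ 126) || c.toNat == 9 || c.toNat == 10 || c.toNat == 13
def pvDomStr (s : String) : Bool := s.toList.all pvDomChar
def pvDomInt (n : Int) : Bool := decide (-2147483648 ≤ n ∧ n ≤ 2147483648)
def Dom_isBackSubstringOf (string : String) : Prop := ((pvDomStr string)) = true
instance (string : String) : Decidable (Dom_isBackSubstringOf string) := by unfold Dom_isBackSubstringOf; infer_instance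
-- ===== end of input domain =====

-- B replaces A's twenty full-string .find scans plus a dict argmin by one left-to-right scan that
-- returns at the first position where a token matches (objective: alternative single-pass decomposition).

-- ===== PORT A =====
def numbersBackA : List String :=
  ["orez", "eno", "owt", "eerht", "ruof", "evif", "xis", "neves", "thgie", "enin"]

def numA : List String := ["0", "1", "2", "3", "4", "5", "6", "7", "8", "9"]

def dict2A : PySem.Dict String Int := PySem.Dict.ofList
  [("orez", 0), ("eno", 1), ("owt", 2), ("eerht", 3), ("ruof", 4), ("evif", 5),
   ("xis", 6), ("neves", 7), ("thgie", 8), ("enin", 9),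
   ("0", 0), ("1", 1), ("2", 2), ("3", 3), ("4", 4),
   ("5", 5), ("6", 6), ("7", 7), ("8", 8), ("9", 9)]

def isBackSubstringOf (string : String) : Int :=
  -- indices = {}; two for-loops doing: if string.find(i) > -1: indices.update({i: string.find(i)})
  let indices1 : PySem.Dict String Int :=
    numbersBackA.foldl
      (fun d i => if PySem.Str.find string i > -1 then d.insert i (PySem.Str.find string i) else d)
      PySem.Dict.empty
  let indices : PySem.Dict String Int :=
    numA.foldl
      (fun d i => if PySem.Str.find string i > -1 then d.insert i (PySem.Str.find string i) else d)
      indices1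
  -- a = min(indices, key=indices.get): first key of minimal value; every key is present, so .get = getD.
  match PySem.List.min? indices.keys (fun k => indices.getD k (-1)) with
  | some a => dict2A.getD a (-1)  -- Dict2[a]; a is always a key of Dict2
  | none => -1                    -- Python raises ValueError (min of empty dict); excluded by Pre_

-- ===== PORT B =====
def tokensB : List (String × Int) :=
  [("orez", 0), ("eno", 1), ("owt", 2), ("eerht", 3), ("ruof", 4), ("evif", 5),
   ("xis", 6), ("neves", 7), ("thgie", 8), ("enin", 9),
   ("0", 0), ("1", 1), ("2", 2), ("3", 3), ("4", 4),
   ("5", 5), ("6", 6), ("7", 7), ("8", 8), ("9", 9)]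

-- Source B's 'for i in range(len(string))' index loop, as structural recursion on the character list:
-- position i of Source B is the head of the current suffix, and string.startswith(tok, i) is exactly
-- 'tok.toList is a prefix of that suffix' (PySem.Chars.startswith on the suffix).
def scanLoopB : List Char → Int
  | [] => -1  -- Source B raises ValueError here; excluded by Pre_
  | c :: rest =>
    match tokensB.find? (fun p => PySem.Chars.startswith (c :: rest) p.1.toList) with
    | some p => p.2
    | none => scanLoopB rest

def isBackSubstringOf_alt (string : String) : Int := scanLoopB string.toList

-- ===== PRECONDITION & SPEC =====
-- Pre_ excludes exactly the strings containing no digit and no reversed number word: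
-- there A raises ValueError (min() of an empty dict) and B raises ValueError too.
def Pre_isBackSubstringOf (string : String) : Prop :=
  ∃ p ∈ tokensB, PySem.Str.isIn p.1 string = true
instance (string : String) : Decidable (Pre_isBackSubstringOf string) := by
  unfold Pre_isBackSubstringOf; infer_instance

def pvWitness_isBackSubstringOf : String := "xxowt3eno"

def Spec_isBackSubstringOf (string : String) (out : Int) : Prop := out = isBackSubstringOf_alt string
instance (string : String) (out : Int) : Decidable (Spec_isBackSubstringOf string out) := by unfold Spec_isBackSubstringOf; infer_instance

-- ===== CLAIM (what is proved, stated in full; the proofs are below) =====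
def Claim_equal_isBackSubstringOf : Prop := ∀ (string : String), Dom_isBackSubstringOf string → Pre_isBackSubstringOf string → Spec_isBackSubstringOf string (isBackSubstringOf string)

-- ===== LEMMAS AND PROOFS =====

-- Concrete facts about the token table, checked by the kernel.
-- no token is a prefix of another (so at most one token can match at a given position)
lemma tok_noprefix : ∀ p ∈ tokensB, ∀ q ∈ tokensB, p.1.toList <+: q.1.toList → p = q := by decide

lemma tok_val : ∀ p ∈ tokensB, dict2A.getD p.1 (-1) = p.2 := by decide

lemma ordToks_eq : numbersBackA ++ numA = tokensB.map Prod.fst := by decide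

-- find returns the first index at which t occurs
lemma find_first (S t : List Char) (m : Nat) (h1 : t <+: S.drop m)
    (h2 : ∀ i < m, ¬ t <+: S.drop i) : PySem.Chars.find S t = m := by
  have hinf : t <:+: S := (h1.isInfix).trans (List.drop_suffix m S).isInfix
  have hnn : 0 ≤ PySem.Chars.find S t := (PySem.Chars.find_nonneg_iff S t).mpr hinf
  obtain ⟨hsp, hmin⟩ := PySem.Chars.find_spec hnn
  have : (PySem.Chars.find S t).toNat = m := by
    rcases lt_trichotomy (PySem.Chars.find S t).toNat m with h | h | h
    · exact absurd hsp (h2 _ h)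
    · exact h
    · exact absurd h1 (hmin m h)
  omega

lemma find_zero_of_prefix {S t : List Char} (h : t <+: S) : PySem.Chars.find S t = 0 := by
  simpa using find_first S t 0 (by simpa using h) (by omega)

lemma find_shift {c : Char} {R t : List Char} (hnp : ¬ t <+: (c :: R)) (hin : t <:+: R) :
    PySem.Chars.find (c :: R) t = 1 + PySem.Chars.find R t := by
  have hnn : 0 ≤ PySem.Chars.find R t := (PySem.Chars.find_nonneg_iff R t).mpr hin
  obtain ⟨hsp, hmin⟩ := PySem.Chars.find_spec hnn
  have h1 : t <+: (c :: R).drop ((PySem.Chars.find R t).toNat + 1) := by simpa using hsp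
  have := find_first (c :: R) t ((PySem.Chars.find R t).toNat + 1) h1 (by
    intro i hi
    cases i with
    | zero => simpa using hnp
    | succ j => simpa using hmin j (by omega))
  omega

lemma min?_eq_some_of_strict {α : Type} {xs : List α} {key : α → Int} {m : α}
    (hm : m ∈ xs) (h : ∀ y ∈ xs, y ≠ m → key m < key y) :
    PySem.List.min? xs key = some m := by
  cases hq : PySem.List.min? xs key with
  | none => exact absurd ((PySem.List.min?_eq_none_iff xs key).mp hq ▸ hm) (List.not_mem_nil)
  | some q =>
    have hqm := PySem.List.min?_mem hq
    have hle := PySem.List.min?_isMin hq m hm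
    by_cases hqm' : q = m
    · rw [hqm']
    · exact absurd hle (by have := h q hqm hqm'; omega)

-- B's scan returns the value of the token with the earliest first occurrence
lemma scan_spec : ∀ (S : List Char) (p : String × Int), p ∈ tokensB → p.1.toList <:+: S →
    (∀ q ∈ tokensB, q.1.toList <:+: S →
      PySem.Chars.find S p.1.toList ≤ PySem.Chars.find S q.1.toList) →
    scanLoopB S = p.2 := by
  intro S
  induction S with
  | nil =>
    intro p hp hinf _
    have h0 : p.1.toList = [] := by simpa using hinf
    have : ∀ p ∈ tokensB, p.1.toList ≠ [] := by decide
    exact absurd h0 (this p hp)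
  | cons c R ih =>
    intro p hp hinf hmin
    cases hf : tokensB.find? (fun q => PySem.Chars.startswith (c :: R) q.1.toList) with
    | some q0 =>
      have hq0mem : q0 ∈ tokensB := List.mem_of_find?_eq_some hf
      have hq0sw := List.find?_some hf
      
      have hq0pre : q0.1.toList <+: (c :: R) := (PySem.Chars.startswith_iff _ _).mp hq0sw
      have hq0f : PySem.Chars.find (c :: R) q0.1.toList = 0 := find_zero_of_prefix hq0pre
      have hple := hmin q0 hq0mem hq0pre.isInfix
      have hpnn : 0 ≤ PySem.Chars.find (c :: R) p.1.toList :=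
        (PySem.Chars.find_nonneg_iff _ _).mpr hinf
      have hpf : PySem.Chars.find (c :: R) p.1.toList = 0 := by omega
      have hppre : p.1.toList <+: (c :: R) := by
        have := (PySem.Chars.find_spec (s := c :: R) (sub := p.1.toList) (by omega)).1
        rw [hpf] at this; simpa using this
      have hpq : p = q0 := by
        rcases List.prefix_or_prefix_of_prefix hppre hq0pre with h | h
        · exact tok_noprefix p hp q0 hq0mem h
        · exact (tok_noprefix q0 hq0mem p hp h).symm
      simp [scanLoopB, hf, hpq]
    | none =>
      have hnop : ∀ q ∈ tokensB, ¬ q.1.toList <+: (c :: R) := by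
        intro q hq hpre
        exact (List.find?_eq_none.mp hf q hq) ((PySem.Chars.startswith_iff _ _).mpr hpre)
      have hinfR : p.1.toList <:+: R :=
        (List.infix_cons_iff.mp hinf).resolve_left (hnop p hp)
      have : scanLoopB (c :: R) = scanLoopB R := by simp [scanLoopB, hf]
      rw [this]
      refine ih p hp hinfR ?_
      intro q hq hqR
      have h2 := hmin q hq (List.infix_cons_iff.mpr (Or.inr hqR))
      rw [find_shift (hnop p hp) hinfR, find_shift (hnop q hq) hqR] at h2
      omega

-- lookup in a dict built from a value-tabulating map
lemma getD_map_tab (L : List String) (f : String → Int) (k : String) (hk : k ∈ L) :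
    (PySem.Dict.mk (L.map (fun t => (t, f t)))).getD k (-1) = f k := by
  induction L with
  | nil => simp at hk
  | cons a L ih =>
    by_cases hak : a = k
    · simp [PySem.Dict.getD, PySem.Dict.get?_mk_cons, hak]
    · have hk' : k ∈ L := by
        rcases List.mem_cons.mp hk with h | h
        · exact absurd h.symm hak
        · exact h
      have hne : (a == k) = false := by simpa using hak
      simp only [List.map_cons, PySem.Dict.getD, PySem.Dict.get?_mk_cons, hne]
      simpa [PySem.Dict.getD] using ih hk'

-- A returns the value of the token with the earliest first occurrence
lemma A_spec : ∀ (string : String) (p : String × Int), p ∈ tokensB →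
    p.1.toList <:+: string.toList →
    (∀ q ∈ tokensB, q.1.toList <:+: string.toList →
      PySem.Chars.find string.toList p.1.toList ≤ PySem.Chars.find string.toList q.1.toList) →
    isBackSubstringOf string = p.2 := by
  intro s p hp hinf hmin
  simp only [isBackSubstringOf]
  have hfold1 := PySem.List.foldl_ite_eq_foldl_filter
    (p := fun (i : String) => PySem.Str.find s i > -1)
    (f := fun (d : PySem.Dict String Int) i => d.insert i (PySem.Str.find s i))
    numbersBackA PySem.Dict.empty
  have hfold2 := PySem.List.foldl_ite_eq_foldl_filter
    (p := fun (i : String) => PySem.Str.find s i > -1)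
    (f := fun (d : PySem.Dict String Int) i => d.insert i (PySem.Str.find s i))
    numA (numbersBackA.foldl
      (fun d i => if PySem.Str.find s i > -1 then d.insert i (PySem.Str.find s i) else d)
      PySem.Dict.empty)
  rw [hfold1] at hfold2 ⊢
  rw [hfold2]
  set presD : String → Bool := fun t => decide (PySem.Str.find s t > -1) with hpres
  set tab : String → String × Int := fun t => (t, PySem.Str.find s t) with htab
  set L : List String := (numbersBackA ++ numA).filter presD with hL
  set d1 : PySem.Dict String Int :=
    (numbersBackA.filter presD).foldl (fun d a => d.insert a (PySem.Str.find s a)) PySem.Dict.empty with hd1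
  have hitems1 : d1.items = (numbersBackA.filter presD).map tab := by
    have := PySem.Dict.items_foldl_insert_fresh (numbersBackA.filter presD)
      (fun a => a) (fun a => PySem.Str.find s a) PySem.Dict.empty
      (by intro a _; rfl)
      (by simpa using (by decide : numbersBackA.Nodup).filter _)
    simpa [htab] using this
  have hfreshdig : ∀ a ∈ numA.filter presD, d1.contains a = false := by
    intro a ha
    have hmem : a ∈ numA := (List.mem_filter.mp ha).1
    have hc : d1.contains a = d1.items.any (fun p => p.1 == a) :=
      PySem.Dict.contains_mk d1.items a
    rw [hitems1] at hc
    rw [hc]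
    simp only [List.any_map, List.any_eq_false]
    intro w hw
    have hwmem : w ∈ numbersBackA := (List.mem_filter.mp hw).1
    have hdw : ∀ a ∈ numA, ∀ w ∈ numbersBackA, (w == a) = false := by decide
    simpa [htab] using hdw a hmem w hwmem
  have hitems2 : ((numA.filter presD).foldl
      (fun d a => d.insert a (PySem.Str.find s a)) d1).items
      = d1.items ++ (numA.filter presD).map tab := by
    have := PySem.Dict.items_foldl_insert_fresh (numA.filter presD)
      (fun a => a) (fun a => PySem.Str.find s a) d1 hfreshdig
      (by simpa using (by decide : numA.Nodup).filter _)
    simpa [htab] using this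
  set indices : PySem.Dict String Int :=
    (numA.filter presD).foldl (fun d a => d.insert a (PySem.Str.find s a)) d1 with hind
  have hitems : indices.items = L.map tab := by
    rw [hitems2, hitems1, hL, List.filter_append, List.map_append]
  have hdict : indices = PySem.Dict.mk (L.map tab) := PySem.Dict.ext hitems
  have hkeys : indices.keys = L := by
    show indices.items.map Prod.fst = L
    rw [hitems, List.map_map]
    simp [htab, Function.comp_def]
  have hgetD : ∀ k ∈ L, indices.getD k (-1) = PySem.Str.find s k := by
    intro k hk
    rw [hdict]
    exact getD_map_tab L (fun t => PySem.Str.find s t) k hk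
  have hmemL : p.1 ∈ L := by
    rw [hL]
    refine List.mem_filter.mpr ⟨?_, ?_⟩
    · rw [ordToks_eq]; exact List.mem_map_of_mem hp
    · have := (PySem.Chars.find_nonneg_iff s.toList p.1.toList).mpr hinf
      simp only [hpres, decide_eq_true_eq, PySem.Str.find_eq]
      omega
  have hmin? : PySem.List.min? indices.keys (fun k => indices.getD k (-1)) = some p.1 := by
    rw [hkeys]
    refine min?_eq_some_of_strict hmemL ?_
    intro y hy hyne
    rw [hgetD y hy, hgetD p.1 hmemL]
    obtain ⟨hyord, hypres⟩ := List.mem_filter.mp hy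
    rw [ordToks_eq] at hyord
    obtain ⟨q, hq, hqy⟩ := List.mem_map.mp hyord
    have hyinf : y.toList <:+: s.toList := by
      have : (0:Int) ≤ PySem.Str.find s y := by
        simp only [hpres, decide_eq_true_eq] at hypres; omega
      rw [PySem.Str.find_eq] at this
      exact (PySem.Chars.find_nonneg_iff _ _).mp this
    have hle : PySem.Chars.find s.toList p.1.toList ≤ PySem.Chars.find s.toList y.toList := by
      rw [← hqy] at hyinf ⊢
      exact hmin q hq hyinf
    rcases lt_or_eq_of_le hle with h | h
    · simp only [PySem.Str.find_eq]; omega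
    · exfalso
      have hnn : 0 ≤ PySem.Chars.find s.toList p.1.toList :=
        (PySem.Chars.find_nonneg_iff _ _).mpr hinf
      have hsp1 := (PySem.Chars.find_spec (s := s.toList) (sub := p.1.toList) hnn).1
      have hsp2 := (PySem.Chars.find_spec (s := s.toList) (sub := y.toList) (by omega)).1
      rw [← h] at hsp2
      have hcmp := List.prefix_or_prefix_of_prefix hsp1 hsp2
      have : p.1 = y := by
        rw [← hqy] at hcmp ⊢
        rcases hcmp with hc | hc
        · exact congrArg Prod.fst (tok_noprefix p hp q hq hc)
        · exact (congrArg Prod.fst (tok_noprefix q hq p hp hc)).symm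
      exact hyne this.symm
  rw [hmin?]
  exact tok_val p hp

-- ===== VERDICT (by name: the statement is the Claim_ definition above) =====
theorem isBackSubstringOf_spec : Claim_equal_isBackSubstringOf := by
  intro s _ hpre
  unfold Spec_isBackSubstringOf isBackSubstringOf_alt
  set filt : List (String × Int) := tokensB.filter (fun p => PySem.Str.isIn p.1 s) with hfilt
  have hne : filt ≠ [] := by
    obtain ⟨p0, hp0, hin0⟩ := hpre
    intro h
    have hmem : p0 ∈ filt := List.mem_filter.mpr ⟨hp0, hin0⟩
    rw [h] at hmem
    exact absurd hmem (List.not_mem_nil)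
  cases hq : PySem.List.min? filt (fun p => PySem.Chars.find s.toList p.1.toList) with
  | none => exact absurd ((PySem.List.min?_eq_none_iff _ _).mp hq) hne
  | some p =>
    obtain ⟨hptok, hpin⟩ := List.mem_filter.mp (PySem.List.min?_mem hq)
    have hpinf : p.1.toList <:+: s.toList := (PySem.Str.isIn_iff_infix _ _).mp hpin
    have hmin : ∀ q ∈ tokensB, q.1.toList <:+: s.toList →
        PySem.Chars.find s.toList p.1.toList ≤ PySem.Chars.find s.toList q.1.toList := by
      intro q hqt hqinf
      exact PySem.List.min?_isMin hq q
        (List.mem_filter.mpr ⟨hqt, (PySem.Str.isIn_iff_infix _ _).mpr hqinf⟩)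
    rw [A_spec s p hptok hpinf hmin, scan_spec s.toList p hptok hpinf hmin]
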